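-- pv_equiv track=rewrite | github.com/sdarmon/stage-M2 | scr/homomorphic_compression.py | homomorphic_compression
-- ===== SOURCE A (Python) =====
-- def homomorphic_compression(read,w):
--     #Removing consecutive duplicates window by window
--     S = read[0:w]
--     current_w = read[0:w]
--     for i in range(1, len(read)-w+1):
--         next_w = read[i:i+w]
--         if current_w != next_w:
--             S += read[i+w-1]
--             current_w = next_w
--     return S
-- ===== SOURCE B (Python) =====
-- def homomorphic_compression(read, w):
--     # One pass with a run-length counter: the window starting at i equals the
--     # window starting at i-1 iff read[i-1:i+w] is a single repeated character,
--     # i.e. iff the run of equal characters ending at j = i+w-1 has length > w.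
--     n = len(read)
--     out = list(read[0:w])
--     run = 1
--     for j in range(1, n):
--         run = run + 1 if read[j] == read[j - 1] else 1
--         if j >= w and run <= w:
--             out.append(read[j])
--     return "".join(out)
-- ===== Notes on version B (the rewrite author's own statement) =====
-- stated objective: faster
-- what changed: Replaces the O(n*w) comparison of each length-w window with its predecessor by a single O(n) pass maintaining a run-length counter of equal adjacent characters (consecutive windows are equal iff the last w+1 characters are all equal).
-- intended difference: For w < 0 with |w| < len(read), A appends extra characters obtained through negative-index wraparound of read[i+w-1]; B returns just read[0:w], the intended value since a nonpositive window width never justifies appending anything. — e.g. on homomorphic_compression("ab", -1): A returns "ab", B returns "a"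
import Mathlib
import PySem

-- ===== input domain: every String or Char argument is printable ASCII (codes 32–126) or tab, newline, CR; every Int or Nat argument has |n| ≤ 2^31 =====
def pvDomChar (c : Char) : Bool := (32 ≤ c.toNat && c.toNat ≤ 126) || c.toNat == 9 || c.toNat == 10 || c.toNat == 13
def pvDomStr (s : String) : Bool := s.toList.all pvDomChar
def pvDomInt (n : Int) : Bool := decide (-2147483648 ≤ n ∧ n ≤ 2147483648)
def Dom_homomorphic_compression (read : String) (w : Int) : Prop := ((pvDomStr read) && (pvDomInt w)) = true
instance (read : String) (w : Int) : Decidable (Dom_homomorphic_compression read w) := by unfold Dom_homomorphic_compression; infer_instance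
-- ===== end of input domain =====

-- B replaces A's O(n·w) window-by-window comparison with one O(n) pass over the string
-- that maintains a run-length counter of equal adjacent characters (objective: faster).

-- ===== PORT A =====
-- the loop body of A; the `none` branch of the match is where Python would raise
-- IndexError — it is unreachable on every input on which A returns
def hcStep (cs : List Char) (w : Int) (st : List Char × List Char) (i : Int) :
    List Char × List Char :=
  let next := PySem.List.slice cs (some i) (some (i + w))
  if st.2 ≠ next then
    (match PySem.List.pyGet? cs (i + w - 1) with
     | some c => st.1 ++ [c]
     | none => st.1,
     next)
  else st

def homomorphic_compression (read : String) (w : Int) : String :=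
  let cs := read.toList
  let S0 := PySem.List.slice cs (some 0) (some w)
  String.ofList
    (((PySem.List.pyRange 1 ((cs.length : Int) - w + 1) 1).foldl (hcStep cs w) (S0, S0)).1)

-- ===== PORT B =====
-- the loop body of B: state = (out, run)
def hcAltStep (cs : List Char) (w : Int) (st : List Char × Int) (j : Int) :
    List Char × Int :=
  let run := if PySem.List.pyGet? cs j = PySem.List.pyGet? cs (j - 1) then st.2 + 1 else 1
  (if w ≤ j ∧ run ≤ w then st.1 ++ (PySem.List.pyGet? cs j).toList else st.1, run)

def homomorphic_compression_alt (read : String) (w : Int) : String :=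
  let cs := read.toList
  let out0 := PySem.List.slice cs (some 0) (some w)
  String.ofList
    (((PySem.List.pyRange 1 (cs.length : Int) 1).foldl (hcAltStep cs w) (out0, 1)).1)

-- ===== PRECONDITION & SPEC =====
-- For w < 0 with |w| < len(read), A appends extra characters obtained through
-- negative-index wraparound of read[i+w-1]; B returns just read[0:w], the intended
-- value since a nonpositive window width never justifies appending anything.
def D_homomorphic_compression (read : String) (w : Int) : Prop :=
  w < 0 ∧ 1 ≤ PySem.Str.len read + w
instance (read : String) (w : Int) : Decidable (D_homomorphic_compression read w) := by
  unfold D_homomorphic_compression; infer_instance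

def Spec_homomorphic_compression (read : String) (w : Int) (out : String) : Prop :=
  ¬ D_homomorphic_compression read w → out = homomorphic_compression_alt read w
instance (read : String) (w : Int) (out : String) :
    Decidable (Spec_homomorphic_compression read w out) := by
  unfold Spec_homomorphic_compression; infer_instance

def pvDiffWitness_homomorphic_compression : String × Int := ("ab", -1)
def pvDiffWitnessOut_homomorphic_compression : String × String := ("ab", "a")

-- ===== CLAIM (what is proved, stated in full; the proofs are below) =====
def Claim_unchanged_homomorphic_compression : Prop :=
  ∀ (read : String) (w : Int), Dom_homomorphic_compression read w →
    Spec_homomorphic_compression read w (homomorphic_compression read w)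

def Claim_changed_homomorphic_compression : Prop :=
  Dom_homomorphic_compression (pvDiffWitness_homomorphic_compression.1) (pvDiffWitness_homomorphic_compression.2) ∧
  D_homomorphic_compression (pvDiffWitness_homomorphic_compression.1) (pvDiffWitness_homomorphic_compression.2) ∧
  homomorphic_compression (pvDiffWitness_homomorphic_compression.1) (pvDiffWitness_homomorphic_compression.2) = pvDiffWitnessOut_homomorphic_compression.1 ∧
  homomorphic_compression_alt (pvDiffWitness_homomorphic_compression.1) (pvDiffWitness_homomorphic_compression.2) = pvDiffWitnessOut_homomorphic_compression.2 ∧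
  pvDiffWitnessOut_homomorphic_compression.1 ≠ pvDiffWitnessOut_homomorphic_compression.2

-- ===== LEMMAS AND PROOFS =====

-- the window of width w' starting at position k
def hcWin (cs : List Char) (w' : Nat) (k : Nat) : List Char := (cs.drop k).take w'

-- run length of equal characters ending at position j (as B's counter computes it)
def hcRl (cs : List Char) : Nat → Int
  | 0 => 1
  | j + 1 => if cs.getD (j + 1) ' ' = cs.getD j ' ' then hcRl cs j + 1 else 1

-- what A appends at loop index i = k+1 (character index k + w')
def hcAppA (cs : List Char) (w' : Nat) (k : Nat) : List Char :=
  if hcWin cs w' k ≠ hcWin cs w' (k + 1) then [cs.getD (k + w') ' '] else []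

-- what B appends at loop index j = k+1
def hcAppB (cs : List Char) (w : Int) (k : Nat) : List Char :=
  if w ≤ (k : Int) + 1 ∧ hcRl cs (k + 1) ≤ w then [cs.getD (k + 1) ' '] else []

lemma hcRl_pos (cs : List Char) (j : Nat) : 1 ≤ hcRl cs j := by
  induction j with
  | zero => simp [hcRl]
  | succ j ih => simp only [hcRl]; split <;> omega

lemma hcA_const (cs : List Char) (w : Int) (l : List Int)
    (h : ∀ i ∈ l, PySem.List.slice cs (some i) (some (i + w)) = ([] : List Char)) :
    l.foldl (hcStep cs w) (([] : List Char), ([] : List Char)) = ([], []) := by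
  induction l with
  | nil => rfl
  | cons i l ih =>
    have hi := h i (by simp)
    have hs : hcStep cs w ([], []) i = ([], []) := by simp [hcStep, hi]
    simp only [List.foldl_cons, hs]
    exact ih (fun j hj => h j (List.mem_cons_of_mem _ hj))

lemma hcB_const_nonpos (cs : List Char) (w : Int) (hw : w ≤ 0) (l : List Int)
    (st : List Char × Int) (h : 1 ≤ st.2) :
    (l.foldl (hcAltStep cs w) st).1 = st.1 := by
  induction l generalizing st with
  | nil => rfl
  | cons j l ih =>
    have h2 : 1 ≤ (hcAltStep cs w st j).2 := by
      simp only [hcAltStep]; split <;> omega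
    have h1 : (hcAltStep cs w st j).1 = st.1 := by
      simp only [hcAltStep]
      rw [if_neg]
      rintro ⟨-, h4⟩
      revert h4; split <;> omega
    simp only [List.foldl_cons, ih _ h2, h1]

lemma hcB_const_small (cs : List Char) (w : Int) (l : List Int)
    (hl : ∀ j ∈ l, (j : Int) < w) (st : List Char × Int) :
    (l.foldl (hcAltStep cs w) st).1 = st.1 := by
  induction l generalizing st with
  | nil => rfl
  | cons j l ih =>
    have h1 : (hcAltStep cs w st j).1 = st.1 := by
      simp only [hcAltStep]
      rw [if_neg]
      rintro ⟨h3, -⟩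
      exact absurd (hl j (by simp)) (by omega)
    simp only [List.foldl_cons, h1, ih (fun j hj => hl j (List.mem_cons_of_mem _ hj))]

lemma hc_slice_empty (cs : List Char) (a b : Int) (h : b ≤ a)
    (h2 : a = b ∨ (0 ≤ a ∧ (cs.length : Int) + b ≤ a)) :
    PySem.List.slice cs (some a) (some b) = ([] : List Char) := by
  have hl := PySem.List.length_slice cs a b
  have hm : PySem.List.clampIdx cs.length b ≤ PySem.List.clampIdx cs.length a := by
    rcases h2 with h2 | h2
    · exact h2 ▸ le_rfl
    · unfold PySem.List.clampIdx
      simp only [min_def]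
      split_ifs <;> omega
  exact List.eq_nil_of_length_eq_zero (by omega)

lemma hcA_inv (cs : List Char) (w : Int) (h1 : 1 ≤ w) (hw : w.toNat ≤ cs.length)
    (m : Nat) (hm : m ≤ cs.length - w.toNat) :
    (PySem.List.pyRange 1 ((m : Int) + 1) 1).foldl (hcStep cs w)
        (cs.take w.toNat, cs.take w.toNat) =
      (cs.take w.toNat ++ (List.range m).flatMap (hcAppA cs w.toNat),
       hcWin cs w.toNat m) := by
  induction m with
  | zero =>
    rw [PySem.List.pyRange_one_eq_nil (by omega)]
    simp [hcWin]
  | succ m ih =>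
    have hm' : m ≤ cs.length - w.toNat := by omega
    have hcast : ((m + 1 : Nat) : Int) + 1 = ((m : Int) + 1) + 1 := by push_cast; ring
    rw [hcast, PySem.List.pyRange_one_succ_right (by omega), List.foldl_append, ih hm']
    have hwc : ((w.toNat : Nat) : Int) = w := Int.toNat_of_nonneg (by omega)
    have hnext : PySem.List.slice cs (some ((m : Int) + 1)) (some ((m : Int) + 1 + w)) =
        hcWin cs w.toNat (m + 1) := by
      have h1 : ((m : Int) + 1) = (((m + 1 : Nat) : Nat) : Int) := by push_cast; ring
      rw [← hwc]
      rw [h1, PySem.List.slice_natCast_add]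
      rfl
    have hidx : (m : Int) + 1 + w - 1 = (((m + w.toNat : Nat) : Nat) : Int) := by
      omega
    have hlt : m + w.toNat < cs.length := by omega
    have hget : PySem.List.pyGet? cs ((m : Int) + 1 + w - 1) = some (cs.getD (m + w.toNat) ' ') := by
      rw [hidx, PySem.List.pyGet?_natCast, List.getElem?_eq_getElem hlt,
        List.getD_eq_getElem cs ' ' hlt]
    simp only [List.foldl_cons, List.foldl_nil, hcStep, hnext, hget]
    by_cases hne : hcWin cs w.toNat m ≠ hcWin cs w.toNat (m + 1)
    · rw [if_pos hne]
      simp only [List.range_succ, List.flatMap_append, List.flatMap_cons, List.flatMap_nil,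
        List.append_nil, hcAppA, if_pos hne, List.append_assoc]
    · rw [if_neg hne]
      rw [not_ne_iff] at hne
      rw [hne]
      simp [List.range_succ, hcAppA]
      exact hne

lemma hcB_inv (cs : List Char) (w : Int) (out0 : List Char) (m : Nat)
    (hm : m + 1 ≤ cs.length) :
    (PySem.List.pyRange 1 ((m : Int) + 1) 1).foldl (hcAltStep cs w) (out0, 1) =
      (out0 ++ (List.range m).flatMap (hcAppB cs w), hcRl cs m) := by
  induction m with
  | zero =>
    rw [PySem.List.pyRange_one_eq_nil (by omega)]
    simp [hcRl]
  | succ m ih =>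
    have hm' : m + 1 ≤ cs.length := by omega
    have hcast : ((m + 1 : Nat) : Int) + 1 = ((m : Int) + 1) + 1 := by omega
    rw [hcast, PySem.List.pyRange_one_succ_right (by omega), List.foldl_append, ih hm']
    have hlt1 : m + 1 < cs.length := by omega
    have hlt0 : m < cs.length := by omega
    have hj1 : PySem.List.pyGet? cs ((m : Int) + 1) = some (cs.getD (m + 1) ' ') := by
      have hc : ((m : Int) + 1) = (((m + 1 : Nat) : Nat) : Int) := by push_cast; ring
      rw [hc, PySem.List.pyGet?_natCast, List.getElem?_eq_getElem hlt1,
        List.getD_eq_getElem cs ' ' hlt1]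
    have hj0 : PySem.List.pyGet? cs ((m : Int) + 1 - 1) = some (cs.getD m ' ') := by
      have hc : ((m : Int) + 1 - 1) = ((m : Nat) : Int) := by omega
      rw [hc, PySem.List.pyGet?_natCast, List.getElem?_eq_getElem hlt0,
        List.getD_eq_getElem cs ' ' hlt0]
    simp only [List.foldl_cons, List.foldl_nil, hcAltStep, hj1, hj0, Option.some.injEq,
      Option.toList_some]
    have hrun : (if cs.getD (m + 1) ' ' = cs.getD m ' ' then hcRl cs m + 1 else 1) =
        hcRl cs (m + 1) := rfl
    rw [hrun]
    by_cases hc : w ≤ (m : Int) + 1 ∧ hcRl cs (m + 1) ≤ w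
    · rw [if_pos hc]
      simp only [List.range_succ, List.flatMap_append, List.flatMap_cons, List.flatMap_nil,
        List.append_nil, hcAppB, if_pos hc, List.append_assoc]
    · rw [if_neg hc]
      simp [List.range_succ, hcAppB, hc]

lemma hcRl_ge_iff (cs : List Char) (j t : Nat) :
    (t : Int) + 1 ≤ hcRl cs j ↔
      (t ≤ j ∧ ∀ u : Nat, j ≤ u + t → u < j → cs.getD (u + 1) ' ' = cs.getD u ' ') := by
  induction j generalizing t with
  | zero =>
    simp only [hcRl]
    constructor
    · intro h
      exact ⟨by omega, fun u h1 h2 => by omega⟩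
    · rintro ⟨h, -⟩
      omega
  | succ j ih =>
    rcases t with _ | t
    · have hp := hcRl_pos cs (j + 1)
      constructor
      · intro _
        exact ⟨by omega, fun u h1 h2 => by omega⟩
      · intro _
        push_cast
        omega
    · simp only [hcRl]
      by_cases hcEq : cs.getD (j + 1) ' ' = cs.getD j ' '
      · rw [if_pos hcEq]
        constructor
        · intro h
          have h' : (t : Int) + 1 ≤ hcRl cs j := by push_cast at h; omega
          obtain ⟨h1, h2⟩ := (ih t).mp h'
          refine ⟨by omega, fun u hu1 hu2 => ?_⟩
          rcases Nat.lt_or_ge u j with hu | hu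
          · exact h2 u (by omega) hu
          · have huj : u = j := by omega
            subst huj
            exact hcEq
        · rintro ⟨h1, h2⟩
          have h' := (ih t).mpr ⟨by omega, fun u hu1 hu2 => h2 u (by omega) (by omega)⟩
          push_cast
          omega
      · rw [if_neg hcEq]
        constructor
        · intro h
          push_cast at h
          omega
        · rintro ⟨h1, h2⟩
          exact absurd (h2 j (by omega) (by omega)) hcEq

lemma hcWin_eq_iff (cs : List Char) (w' : Nat) (k : Nat) (hk : k + 1 + w' ≤ cs.length) :
    hcWin cs w' k = hcWin cs w' (k + 1) ↔
      (∀ u : Nat, k ≤ u → u < k + w' → cs.getD (u + 1) ' ' = cs.getD u ' ') := by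
  constructor
  · intro h u hu1 hu2
    have ht : u - k < w' := by omega
    have e : (hcWin cs w' k)[u - k]? = (hcWin cs w' (k + 1))[u - k]? := by rw [h]
    simp only [hcWin, List.getElem?_take, List.getElem?_drop, if_pos ht] at e
    have e1 : k + (u - k) = u := by omega
    have e2 : k + 1 + (u - k) = u + 1 := by omega
    rw [e1, e2] at e
    rw [List.getD_eq_getElem?_getD, List.getD_eq_getElem?_getD, e]
  · intro h
    refine List.ext_getElem ?_ ?_
    · simp only [hcWin, List.length_take, List.length_drop]
      omega
    · intro t h1 h2
      have hlt : t < w' := by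
        simp only [hcWin, List.length_take, List.length_drop] at h1
        omega
      simp only [hcWin, List.getElem_take, List.getElem_drop]
      have hv1 : k + t < cs.length := by omega
      have hv2 : k + t + 1 < cs.length := by omega
      have hu := h (k + t) (by omega) (by omega)
      rw [List.getD_eq_getElem?_getD, List.getD_eq_getElem?_getD,
        List.getElem?_eq_getElem hv1, List.getElem?_eq_getElem hv2] at hu
      simp only [Option.getD_some] at hu
      simp only [show k + 1 + t = k + t + 1 from by omega]
      exact hu.symm

lemma hc_key (cs : List Char) (w : Int) (h1 : 1 ≤ w) (k : Nat)
    (hk : k + 1 + w.toNat ≤ cs.length) :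
    (hcRl cs (k + w.toNat) ≤ w ↔ hcWin cs w.toNat k ≠ hcWin cs w.toNat (k + 1)) := by
  have hwc : ((w.toNat : Nat) : Int) = w := Int.toNat_of_nonneg (by omega)
  have heq : hcWin cs w.toNat k = hcWin cs w.toNat (k + 1) ↔
      (w.toNat : Int) + 1 ≤ hcRl cs (k + w.toNat) := by
    rw [hcWin_eq_iff cs w.toNat k hk, hcRl_ge_iff cs (k + w.toNat) w.toNat]
    constructor
    · intro hall
      exact ⟨by omega, fun u hu1 hu2 => hall u (by omega) (by omega)⟩
    · rintro ⟨-, hall⟩ u hu1 hu2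
      exact hall u (by omega) (by omega)
  rw [ne_eq, heq, hwc]
  omega

lemma hc_bridge (cs : List Char) (w : Int) (h1 : 1 ≤ w) (hw : w.toNat ≤ cs.length) :
    (List.range (cs.length - 1)).flatMap (hcAppB cs w) =
      (List.range (cs.length - w.toNat)).flatMap (hcAppA cs w.toNat) := by
  have hwc : ((w.toNat : Nat) : Int) = w := Int.toNat_of_nonneg (by omega)
  have hw1 : 1 ≤ w.toNat := by omega
  have hsplit : cs.length - 1 = (w.toNat - 1) + (cs.length - w.toNat) := by omega
  rw [hsplit, List.range_add, List.flatMap_append]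
  have hfirst : (List.range (w.toNat - 1)).flatMap (hcAppB cs w) = [] := by
    rw [List.flatMap_eq_nil_iff]
    intro k hk
    rw [List.mem_range] at hk
    unfold hcAppB
    rw [if_neg]
    rintro ⟨hc1, -⟩
    omega
  rw [hfirst, List.nil_append, List.flatMap_map]
  apply List.flatMap_congr
  intro k hk
  rw [List.mem_range] at hk
  have hkey := hc_key cs w h1 k (by omega)
  have e1 : w.toNat - 1 + k + 1 = k + w.toNat := by omega
  unfold hcAppB hcAppA
  rw [e1]
  have hc1 : w ≤ ((w.toNat - 1 + k : Nat) : Int) + 1 := by omega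
  by_cases hNe : hcWin cs w.toNat k ≠ hcWin cs w.toNat (k + 1)
  · rw [if_pos ⟨hc1, hkey.mpr hNe⟩, if_pos hNe]
  · rw [if_neg (by rintro ⟨-, hr⟩; exact hNe (hkey.mp hr)), if_neg hNe]

lemma hc_main (cs : List Char) (w : Int) (hD : ¬ (w < 0 ∧ 1 ≤ (cs.length : Int) + w)) :
    ((PySem.List.pyRange 1 ((cs.length : Int) - w + 1) 1).foldl (hcStep cs w)
        (PySem.List.slice cs (some 0) (some w), PySem.List.slice cs (some 0) (some w))).1 =
      ((PySem.List.pyRange 1 (cs.length : Int) 1).foldl (hcAltStep cs w)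
        (PySem.List.slice cs (some 0) (some w), 1)).1 := by
  by_cases hw1 : 1 ≤ w
  · have hwc : ((w.toNat : Nat) : Int) = w := Int.toNat_of_nonneg (by omega)
    have hS0 : PySem.List.slice cs (some 0) (some w) = cs.take w.toNat := by
      rw [PySem.List.slice_toNat cs (by omega) (by omega)]
      simp
    rw [hS0]
    by_cases hn : cs.length < w.toNat
    · rw [PySem.List.pyRange_one_eq_nil (by omega), List.foldl_nil,
        hcB_const_small cs w _ (fun j hj => by
          rw [PySem.List.mem_pyRange_one] at hj; omega) _]
    · have hwn : w.toNat ≤ cs.length := by omega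
      have hbA : (cs.length : Int) - w + 1 = ((cs.length - w.toNat : Nat) : Int) + 1 := by
        omega
      have hbB : (cs.length : Int) = ((cs.length - 1 : Nat) : Int) + 1 := by omega
      rw [hbA, hcA_inv cs w hw1 hwn (cs.length - w.toNat) le_rfl, hbB,
        hcB_inv cs w _ (cs.length - 1) (by omega), hc_bridge cs w hw1 hwn]
  · have hcases : w = 0 ∨ (cs.length : Int) + w ≤ 0 := by omega
    have hS0 : PySem.List.slice cs (some 0) (some w) = ([] : List Char) := by
      apply hc_slice_empty cs 0 w (by omega)
      rcases hcases with rfl | h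
      · exact Or.inl rfl
      · exact Or.inr ⟨le_rfl, by omega⟩
    rw [hS0, hcA_const cs w _ (fun i hi => ?_),
      hcB_const_nonpos cs w (by omega) _ _ (by norm_num)]
    rw [PySem.List.mem_pyRange_one] at hi
    apply hc_slice_empty cs i (i + w) (by omega)
    rcases hcases with rfl | h
    · exact Or.inl (by omega)
    · exact Or.inr ⟨by omega, by omega⟩

-- ===== VERDICT (by name: the statement is the Claim_ definition above) =====
theorem homomorphic_compression_spec : Claim_unchanged_homomorphic_compression := by
  intro read w _ hD
  have hD' : ¬ (w < 0 ∧ 1 ≤ (read.toList.length : Int) + w) := by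
    simpa [D_homomorphic_compression, PySem.Str.len_eq] using hD
  simp only [homomorphic_compression, homomorphic_compression_alt]
  exact congrArg String.ofList (hc_main read.toList w hD')

theorem homomorphic_compression_changed : Claim_changed_homomorphic_compression := by
  unfold Claim_changed_homomorphic_compression; decide
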